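-- pv_equiv track=rewrite | github.com/wwwwodddd/Zukunft | PE/749.py | F
-- ===== SOURCE A (Python) =====
-- def F(n):
-- 	s = str(n)
-- 	for k in range(60):
-- 		t = sum(int(i) ** k for i in s)
-- 		if t == n - 1 or t == n + 1:
-- 			return k
-- 		if t > n + 1:
-- 			return 0
-- 	return 0
-- ===== SOURCE B (Python) =====
-- def F(n):
--     ds = [int(c) for c in str(n)]
--
--     def t(k):
--         return sum(d ** k for d in ds)
--
--     # k = 0 can only ever produce the return value 0 (the hit returns k == 0,
--     # the overshoot returns 0), so both branches collapse into one test.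
--     t0 = t(0)
--     if t0 >= n - 1 and t0 != n:
--         return 0
--
--     def least(lo, bound):
--         # least k in [lo, 60) with t(k) >= bound, else 60 -- binary search,
--         # valid because t is nondecreasing on k >= 1 (digits lie in 0..9).
--         hi = 60
--         while lo < hi:
--             mid = (lo + hi) // 2
--             if t(mid) < bound:
--                 lo = mid + 1
--             else:
--                 hi = mid
--         return lo
--
--     i = least(1, n - 1)
--     if i == 60:
--         return 0
--     ti = t(i)
--     if ti == n - 1 or ti == n + 1:
--         return i
--     if ti > n + 1:
--         return 0
--     # ti == n: the scan would keep going until t first exceeds n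
--     j = least(i + 1, n + 1)
--     if j == 60:
--         return 0
--     return j if t(j) == n + 1 else 0
-- ===== Notes on version B (the rewrite author's own statement) =====
-- stated objective: alternative
-- what changed: B replaces A's linear scan over k with binary searches for the first k where the digit-power sum t(k) crosses n-1 (and, if t lands exactly on n, a second binary search for the first crossing of n+1), justified by t(k) being nondecreasing for k>=1 since digits lie in 0..9; k=0 is handled separately because 0**0==1 breaks monotonicity.
import Mathlib
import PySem

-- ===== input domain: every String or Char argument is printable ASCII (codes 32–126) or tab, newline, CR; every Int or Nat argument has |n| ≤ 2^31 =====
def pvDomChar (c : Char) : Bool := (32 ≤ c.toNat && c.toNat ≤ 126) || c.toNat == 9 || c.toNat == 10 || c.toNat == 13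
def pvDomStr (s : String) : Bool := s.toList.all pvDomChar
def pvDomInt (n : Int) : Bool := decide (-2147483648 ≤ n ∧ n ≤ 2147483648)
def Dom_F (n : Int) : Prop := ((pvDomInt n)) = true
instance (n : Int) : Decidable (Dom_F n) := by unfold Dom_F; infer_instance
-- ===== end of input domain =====

-- B replaces A's linear scan over the exponent k with binary searches for the
-- crossing points of the nondecreasing digit-power sum (alternative algorithm).

-- ===== PORT A =====
-- int(ch) for a single digit character; exact for '0'..'9' (Pre_F excludes negative n,
-- where Python's int('-') raises ValueError).
def digitVal (c : Char) : Int := (c.toNat : Int) - 48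

def F_loop (n : Int) (s : List Char) (k fuel : Nat) : Int :=
  match fuel with
  | 0 => 0
  | fuel+1 =>
    let t := s.foldl (fun a c => a + digitVal c ^ k) 0
    if t = n - 1 ∨ t = n + 1 then (k : Int)
    else if t > n + 1 then 0
    else F_loop n s (k+1) fuel

def F (n : Int) : Int := F_loop n (PySem.Int.toStr n).toList 0 60

-- ===== PORT B =====
-- t(k) = sum(d ** k for d in ds)
def tSum (ds : List Int) (k : Nat) : Int := (ds.map (fun d => d ^ k)).sum

-- least(lo, bound): least k in [lo, 60) with t(k) >= bound, else 60, by binary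
-- search (hi, lo, mid are nonnegative Python ints, so Nat; (lo+hi)//2 = Nat division).
def F_alt_least (ds : List Int) (bound : Int) (lo hi : Nat) : Nat :=
  if lo < hi then
    let mid := (lo + hi) / 2
    if tSum ds mid < bound then F_alt_least ds bound (mid+1) hi
    else F_alt_least ds bound lo mid
  else lo
termination_by hi - lo
decreasing_by all_goals omega

def F_alt (n : Int) : Int :=
  let ds := (PySem.Int.toStr n).toList.map digitVal
  let t0 := tSum ds 0
  if t0 ≥ n - 1 ∧ t0 ≠ n then 0
  else
    let i := F_alt_least ds (n - 1) 1 60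
    if i = 60 then 0
    else
      let ti := tSum ds i
      if ti = n - 1 ∨ ti = n + 1 then (i : Int)
      else if ti > n + 1 then 0
      else
        let j := F_alt_least ds (n + 1) (i + 1) 60
        if j = 60 then 0
        else if tSum ds j = n + 1 then (j : Int) else 0

-- ===== PRECONDITION & SPEC =====
-- Pre_F excludes negative n, on which both Pythons raise ValueError (int('-')).
def Pre_F (n : Int) : Prop := 0 ≤ n
instance (n : Int) : Decidable (Pre_F n) := by unfold Pre_F; infer_instance
def pvWitness_F : Int := 10

def Spec_F (n : Int) (out : Int) : Prop := out = F_alt n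
instance (n : Int) (out : Int) : Decidable (Spec_F n out) := by unfold Spec_F; infer_instance

-- ===== CLAIM (what is proved, stated in full; the proofs are below) =====
def Claim_equal_F : Prop := ∀ (n : Int), Dom_F n → Pre_F n → Spec_F n (F n)

-- ===== LEMMAS AND PROOFS =====

-- characters produced by Nat.toDigitsCore (base 10) on a digit-char accumulator are digit chars
theorem toDigitsCore_digits (fuel : Nat) :
    ∀ (m : Nat) (acc : List Char), (∀ c ∈ acc, 48 ≤ c.toNat ∧ c.toNat ≤ 57) →
      ∀ c ∈ Nat.toDigitsCore 10 fuel m acc, 48 ≤ c.toNat ∧ c.toNat ≤ 57 := by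
  induction fuel with
  | zero => intro m acc hacc; simpa [Nat.toDigitsCore] using hacc
  | succ fuel ih =>
    intro m acc hacc
    have hd : 48 ≤ (Nat.digitChar (m % 10)).toNat ∧ (Nat.digitChar (m % 10)).toNat ≤ 57 := by
      have h10 : m % 10 < 10 := Nat.mod_lt _ (by omega)
      interval_cases h : (m % 10) <;> decide
    have hacc' : ∀ c ∈ Nat.digitChar (m % 10) :: acc, 48 ≤ c.toNat ∧ c.toNat ≤ 57 := by
      intro c hc
      rcases List.mem_cons.mp hc with h | h
      · exact h ▸ hd
      · exact hacc c h
    simp only [Nat.toDigitsCore]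
    split
    · exact hacc'
    · exact ih _ _ hacc'

-- digits of str(n) for n ≥ 0 have values in [0, 9]
theorem ds_range (n : Int) (hn : 0 ≤ n) :
    ∀ d ∈ (PySem.Int.toStr n).toList.map digitVal, 0 ≤ d ∧ d ≤ 9 := by
  intro d hd
  rcases List.mem_map.mp hd with ⟨c, hc, rfl⟩
  have hc' : c ∈ Nat.toDigits 10 n.toNat := by
    have : (PySem.Int.toStr n).toList = PySem.Int.toChars n := by
      simp [PySem.Int.toStr]
    rw [this] at hc
    simpa [PySem.Int.toChars, not_lt.mpr hn] using hc
  have := toDigitsCore_digits _ _ _ (by intro c hc; simp at hc) c hc'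
  unfold digitVal
  omega
-- t is nondecreasing on k ≥ 1 when all digits lie in [0, 9]
theorem tSum_mono (ds : List Int) (hds : ∀ d ∈ ds, 0 ≤ d ∧ d ≤ 9)
    (j k : Nat) (hj : 1 ≤ j) (hjk : j ≤ k) : tSum ds j ≤ tSum ds k := by
  unfold tSum
  apply List.sum_le_sum
  intro d hd
  rcases hds d hd with ⟨h0, _⟩
  rcases eq_or_lt_of_le h0 with h | h
  · subst h
    rw [zero_pow (by omega), zero_pow (by omega)]
  · exact pow_le_pow_right₀ (by omega) hjk

-- specification of the binary search
theorem least_spec (ds : List Int) (bound : Int)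
    (hm : ∀ j k : Nat, 1 ≤ j → j ≤ k → tSum ds j ≤ tSum ds k) :
    ∀ (lo hi : Nat), 1 ≤ lo →
      lo ≤ F_alt_least ds bound lo hi ∧
      (lo ≤ hi → F_alt_least ds bound lo hi ≤ hi) ∧
      (∀ j : Nat, lo ≤ j → j < F_alt_least ds bound lo hi → tSum ds j < bound) ∧
      (F_alt_least ds bound lo hi < hi → bound ≤ tSum ds (F_alt_least ds bound lo hi)) := by
  intro lo hi
  induction lo, hi using F_alt_least.induct ds bound with
  | case1 lo hi hlt mid hmid ih =>
    intro h1
    have hrw : F_alt_least ds bound lo hi = F_alt_least ds bound (mid + 1) hi := by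
      rw [F_alt_least, if_pos hlt]
      exact if_pos hmid
    have hmb : lo ≤ mid ∧ mid < hi := by
      have hmideq : mid = (lo + hi) / 2 := rfl
      omega
    rw [hrw]
    obtain ⟨ih1, ih2, ih3, ih4⟩ := ih (by omega)
    refine ⟨by omega, fun _ => ih2 (by omega), ?_, ih4⟩
    intro j hj1 hj2
    by_cases hjm : j ≤ mid
    · calc tSum ds j ≤ tSum ds mid := hm _ _ (by omega) hjm
        _ < bound := hmid
    · exact ih3 j (by omega) hj2
  | case2 lo hi hlt mid hmid ih =>
    intro h1
    have hrw : F_alt_least ds bound lo hi = F_alt_least ds bound lo mid := by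
      rw [F_alt_least, if_pos hlt]
      exact if_neg hmid
    have hmb : lo ≤ mid ∧ mid < hi := by
      have hmideq : mid = (lo + hi) / 2 := rfl
      omega
    rw [hrw]
    obtain ⟨ih1, ih2, ih3, ih4⟩ := ih h1
    refine ⟨ih1, fun _ => by have := ih2 (by omega); omega, ih3, ?_⟩
    intro hlt2
    by_cases h : F_alt_least ds bound lo mid < mid
    · exact ih4 h
    · have heq : F_alt_least ds bound lo mid = mid := by
        have := ih2 (by omega); omega
      rw [heq]
      omega
  | case3 lo hi hge =>
    intro h1
    have hrw : F_alt_least ds bound lo hi = lo := by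
      rw [F_alt_least]
      simp only [if_neg hge]
    rw [hrw]
    exact ⟨le_refl _, fun h => by omega, fun j h1 h2 => by omega, fun h => by omega⟩

-- A's per-iteration sum equals tSum of the digit list
theorem foldl_eq_tSum (s : List Char) (k : Nat) :
    s.foldl (fun a c => a + digitVal c ^ k) 0 = tSum (s.map digitVal) k := by
  rw [PySem.List.foldl_add s (fun c => digitVal c ^ k) 0]
  simp [tSum, List.map_map, Function.comp_def]

-- one unfolding of A's loop at index i < 60 with fuel 60 - i
theorem loop_step (n : Int) (s : List Char) (i : Nat) (hi : i < 60) :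
    F_loop n s i (60 - i) =
      (if tSum (s.map digitVal) i = n - 1 ∨ tSum (s.map digitVal) i = n + 1 then (i : Int)
       else if tSum (s.map digitVal) i > n + 1 then 0
       else F_loop n s (i+1) (60 - (i+1))) := by
  have h : 60 - i = (60 - (i+1)) + 1 := by omega
  rw [h, F_loop, foldl_eq_tSum]

-- skipping all "continue" indices
theorem loop_reach (n : Int) (s : List Char) :
    ∀ (d k : Nat), k + d ≤ 60 →
      (∀ j : Nat, k ≤ j → j < k + d →
        tSum (s.map digitVal) j < n - 1 ∨ tSum (s.map digitVal) j = n) →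
      F_loop n s k (60 - k) = F_loop n s (k + d) (60 - (k + d)) := by
  intro d
  induction d with
  | zero => intro k _ _; rfl
  | succ d ih =>
    intro k hk hcont
    have hstep : F_loop n s k (60 - k) = F_loop n s (k+1) (60 - (k+1)) := by
      rw [loop_step n s k (by omega)]
      rcases hcont k (le_refl _) (by omega) with h | h
      · rw [if_neg (by omega), if_neg (by omega)]
      · rw [if_neg (by omega), if_neg (by omega)]
    rw [hstep]
    have := ih (k+1) (by omega) (fun j h1 h2 => hcont j (by omega) (by omega))
    rw [this]
    congr 1 <;> omega

theorem F_eq_alt (n : Int) (hn : 0 ≤ n) : F n = F_alt n := by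
  unfold F F_alt
  set s := (PySem.Int.toStr n).toList with hs
  set ds := s.map digitVal with hds
  have hdr : ∀ d ∈ ds, 0 ≤ d ∧ d ≤ 9 := ds_range n hn
  have hm : ∀ j k : Nat, 1 ≤ j → j ≤ k → tSum ds j ≤ tSum ds k := fun j k h1 h2 =>
    tSum_mono ds hdr j k h1 h2
  have h0 : F_loop n s 0 60 = F_loop n s 0 (60 - 0) := rfl
  rw [h0, loop_step n s 0 (by omega), ← hds]
  simp only []
  by_cases hb0 : tSum ds 0 ≥ n - 1 ∧ tSum ds 0 ≠ n
  · -- B returns 0; A returns 0 at k = 0 (either branch)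
    rw [if_pos hb0]
    rcases lt_or_ge (n + 1) (tSum ds 0) with h | h
    · rw [if_neg (by omega), if_pos (by omega)]
    · have : tSum ds 0 = n - 1 ∨ tSum ds 0 = n + 1 := by omega
      rw [if_pos this]
      rfl
  · -- A continues past k = 0
    rw [if_neg hb0]
    have hcont0 : tSum ds 0 < n - 1 ∨ tSum ds 0 = n := by
      by_cases h : tSum ds 0 = n
      · exact Or.inr h
      · left; by_contra hc; exact hb0 ⟨by omega, h⟩
    rw [if_neg (by omega), if_neg (by omega)]
    -- first binary search
    obtain ⟨hi1, hi2, hi3, hi4⟩ := least_spec ds (n - 1) hm 1 60 (le_refl _)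
    set i := F_alt_least ds (n - 1) 1 60 with hi
    have hi60 : i ≤ 60 := hi2 (by omega)
    have hreach : F_loop n s 1 (60 - 1) = F_loop n s i (60 - i) := by
      have := loop_reach n s (i - 1) 1 (by omega)
        (fun j h1 h2 => Or.inl (hi3 j h1 (by omega)))
      rw [show (1 + (i - 1)) = i by omega] at this
      exact this
    rw [show (0 + 1 : Nat) = 1 from rfl, hreach]
    by_cases hi60' : i = 60
    · rw [if_pos hi60', hi60']
      rfl
    · rw [if_neg hi60']
      have hilt : i < 60 := by omega
      have hige : n - 1 ≤ tSum ds i := hi4 hilt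
      rw [loop_step n s i hilt, ← hds]
      by_cases hhit : tSum ds i = n - 1 ∨ tSum ds i = n + 1
      · rw [if_pos hhit, if_pos hhit]
      · rw [if_neg hhit, if_neg hhit]
        by_cases hbad : tSum ds i > n + 1
        · rw [if_pos hbad, if_pos hbad]
        · rw [if_neg hbad, if_neg hbad]
          have hieqn : tSum ds i = n := by omega
          -- second binary search
          obtain ⟨hj1, hj2, hj3, hj4⟩ := least_spec ds (n + 1) hm (i + 1) 60 (by omega)
          set j := F_alt_least ds (n + 1) (i + 1) 60 with hj
          have hj60 : j ≤ 60 := hj2 (by omega)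
          have hreach2 : F_loop n s (i+1) (60 - (i+1)) = F_loop n s j (60 - j) := by
            have := loop_reach n s (j - (i+1)) (i+1) (by omega)
              (fun m h1 h2 => by
                rw [← hds]
                right
                have hlt : tSum ds m < n + 1 := hj3 m h1 (by omega)
                have hgen : tSum ds i ≤ tSum ds m := hm i m (by omega) (by omega)
                omega)
            rw [show (i + 1 + (j - (i+1))) = j by omega] at this
            exact this
          rw [hreach2]
          by_cases hj60' : j = 60
          · rw [if_pos hj60', hj60']
            rfl
          · rw [if_neg hj60']
            have hjlt : j < 60 := by omega
            have hjge : n + 1 ≤ tSum ds j := hj4 hjlt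
            rw [loop_step n s j hjlt, ← hds]
            by_cases hjhit : tSum ds j = n + 1
            · rw [if_pos (Or.inr hjhit), if_pos hjhit]
            · rw [if_neg (by omega), if_pos (by omega), if_neg hjhit]

-- ===== VERDICT (by name: the statement is the Claim_ definition above) =====
theorem F_spec : Claim_equal_F := by
  intro n _ hn
  unfold Spec_F
  exact F_eq_alt n hn
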